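-- pv_equiv track=rewrite | github.com/yoadjei/yield-africa | scripts/01c_chirps.py | season_months
-- ===== SOURCE A (Python) =====
-- SEASON_CALENDAR = {
--     "Nigeria":   (4,  9),
--     "Ethiopia":  (6, 11),
--     "Tanzania":  (3,  8),
--     "Uganda":    (3,  8),
--     "Malawi":    (11, 4),
-- }
--
-- def season_months(year: int, country: str) -> list[tuple[int, int]]:
--     """
--     Return list of (year, month) tuples covering the growing season
--     for a given country and harvest year.
--     """
--     m_start, m_end = SEASON_CALENDAR[country]
--     months = []
--     if m_start <= m_end:
--         for m in range(m_start, m_end + 1):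
--             months.append((year, m))
--     else:
--         # Wraps year boundary: season starts in year-1
--         for m in range(m_start, 13):
--             months.append((year - 1, m))
--         for m in range(1, m_end + 1):
--             months.append((year, m))
--     return months
-- ===== SOURCE B (Python) =====
-- SEASON_CALENDAR = {
--     "Nigeria":   (4,  9),
--     "Ethiopia":  (6, 11),
--     "Tanzania":  (3,  8),
--     "Uganda":    (3,  8),
--     "Malawi":    (11, 4),
-- }
--
-- def season_months(year: int, country: str) -> list[tuple[int, int]]:
--     """Single modular-arithmetic pass with a running year counter."""
--     m_start, m_end = SEASON_CALENDAR[country]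
--     n = (m_end - m_start) % 12 + 1
--     cur = year - 1 if m_start > m_end else year
--     out = []
--     for i in range(n):
--         month = (m_start - 1 + i) % 12 + 1
--         if i > 0 and month == 1:
--             cur += 1
--         out.append((cur, month))
--     return out
-- ===== Notes on version B (the rewrite author's own statement) =====
-- stated objective: alternative
-- what changed: Replaced A's two separate range loops with explicit year-1/year handling by a single modular-arithmetic loop (season length (m_end-m_start)%12+1, month (m_start-1+i)%12+1) with a running year counter incremented at the January boundary.
import Mathlib
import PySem

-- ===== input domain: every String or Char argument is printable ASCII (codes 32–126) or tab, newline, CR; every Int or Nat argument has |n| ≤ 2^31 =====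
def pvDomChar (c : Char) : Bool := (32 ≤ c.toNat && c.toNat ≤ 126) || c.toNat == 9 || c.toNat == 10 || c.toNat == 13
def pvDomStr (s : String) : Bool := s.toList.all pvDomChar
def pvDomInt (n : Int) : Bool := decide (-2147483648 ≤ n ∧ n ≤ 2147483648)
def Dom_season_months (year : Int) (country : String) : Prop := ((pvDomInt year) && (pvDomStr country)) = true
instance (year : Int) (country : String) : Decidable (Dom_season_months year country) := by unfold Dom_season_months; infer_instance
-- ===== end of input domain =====

-- B replaces A's two explicit range loops (with separate year-1/year handling) by one
-- modular-arithmetic pass with a running year counter; objective: alternative decomposition.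
-- A raises KeyError for countries outside SEASON_CALENDAR; Pre_ excludes those.


-- ===== PORT A =====
def seasonCalendar : PySem.Dict String (Int × Int) := PySem.Dict.ofList
  [("Nigeria", (4, 9)), ("Ethiopia", (6, 11)), ("Tanzania", (3, 8)),
   ("Uganda", (3, 8)), ("Malawi", (11, 4))]

def season_months (year : Int) (country : String) : List (Int × Int) :=
  match PySem.Dict.get? seasonCalendar country with
  | none => []  -- unreachable under Pre_ (Python raises KeyError here)
  | some (mStart, mEnd) =>
    if mStart ≤ mEnd then
      (PySem.List.pyRange mStart (mEnd + 1) 1).foldl (fun acc m => acc ++ [(year, m)]) []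
    else
      let months := (PySem.List.pyRange mStart 13 1).foldl (fun acc m => acc ++ [(year - 1, m)]) []
      (PySem.List.pyRange 1 (mEnd + 1) 1).foldl (fun acc m => acc ++ [(year, m)]) months

-- ===== PORT B =====
def season_months_alt (year : Int) (country : String) : List (Int × Int) :=
  match PySem.Dict.get? seasonCalendar country with
  | none => []  -- unreachable under Pre_ (Python raises KeyError here)
  | some (mStart, mEnd) =>
    let n := PySem.Int.mod (mEnd - mStart) 12 + 1
    let cur0 := if mStart > mEnd then year - 1 else year
    let st := (PySem.List.pyRange 0 n 1).foldl
      (fun (st : Int × List (Int × Int)) i =>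
        let month := PySem.Int.mod (mStart - 1 + i) 12 + 1
        let cur := if i > 0 ∧ month = 1 then st.1 + 1 else st.1
        (cur, st.2 ++ [(cur, month)]))
      (cur0, [])
    st.2

-- ===== PRECONDITION & SPEC =====
-- Pre_ excludes countries absent from SEASON_CALENDAR, on which Python A raises KeyError.
def Pre_season_months (year : Int) (country : String) : Prop :=
  country = "Nigeria" ∨ country = "Ethiopia" ∨ country = "Tanzania" ∨
  country = "Uganda" ∨ country = "Malawi"
instance (year : Int) (country : String) : Decidable (Pre_season_months year country) := by
  unfold Pre_season_months; infer_instance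
def pvWitness_season_months : Int × String := (2020, "Malawi")

def Spec_season_months (year : Int) (country : String) (out : List (Int × Int)) : Prop := out = season_months_alt year country
instance (year : Int) (country : String) (out : List (Int × Int)) : Decidable (Spec_season_months year country out) := by unfold Spec_season_months; infer_instance

-- ===== CLAIM (what is proved, stated in full; the proofs are below) =====
def Claim_equal_season_months : Prop := ∀ (year : Int) (country : String), Dom_season_months year country → Pre_season_months year country → Spec_season_months year country (season_months year country)

-- ===== LEMMAS AND PROOFS =====

-- ===== VERDICT (by name: the statement is the Claim_ definition above) =====
theorem season_months_spec : Claim_equal_season_months := by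
  intro year country _ hpre
  unfold Spec_season_months
  rcases hpre with h | h | h | h | h <;> subst h
  · rfl
  · rfl
  · rfl
  · rfl
  · have hA : season_months year "Malawi" =
        [(year - 1, 11), (year - 1, 12), (year, 1), (year, 2), (year, 3), (year, 4)] := rfl
    have hB : season_months_alt year "Malawi" =
        [(year - 1, 11), (year - 1, 12), (year - 1 + 1, 1), (year - 1 + 1, 2),
         (year - 1 + 1, 3), (year - 1 + 1, 4)] := rfl
    rw [hA, hB]
    norm_num
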